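-- pv_equiv track=rewrite | github.com/awhg23/HDU-SNAP | generate_debug_report.py | split_sessions
-- ===== SOURCE A (Python) =====
-- def split_sessions(recent_rows):
--     sessions = []
--     current = []
--     prev = None
--     for row in recent_rows:
--         if prev is not None and row["item_id"] <= prev["item_id"]:
--             sessions.append(current)
--             current = []
--         current.append(row)
--         prev = row
--     if current:
--         sessions.append(current)
--     return sessions
-- ===== SOURCE B (Python) =====
-- def split_sessions(recent_rows):
--     # Right-to-left single pass: each row either merges into the session that
--     # follows it (strictly increasing item_id) or opens a new session.
--     sessions = []
--     for row in reversed(recent_rows):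
--         if sessions and sessions[0][0]["item_id"] > row["item_id"]:
--             sessions[0].insert(0, row)
--         else:
--             sessions.insert(0, [row])
--     return sessions
-- ===== Notes on version B (the rewrite author's own statement) =====
-- stated objective: alternative
-- what changed: B replaces A's forward accumulator loop (current/prev state plus a trailing flush) by a single right-to-left fold that either prepends the row to the following session or opens a new one, so there is no prev variable and no final 'if current' step.
import Mathlib
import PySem

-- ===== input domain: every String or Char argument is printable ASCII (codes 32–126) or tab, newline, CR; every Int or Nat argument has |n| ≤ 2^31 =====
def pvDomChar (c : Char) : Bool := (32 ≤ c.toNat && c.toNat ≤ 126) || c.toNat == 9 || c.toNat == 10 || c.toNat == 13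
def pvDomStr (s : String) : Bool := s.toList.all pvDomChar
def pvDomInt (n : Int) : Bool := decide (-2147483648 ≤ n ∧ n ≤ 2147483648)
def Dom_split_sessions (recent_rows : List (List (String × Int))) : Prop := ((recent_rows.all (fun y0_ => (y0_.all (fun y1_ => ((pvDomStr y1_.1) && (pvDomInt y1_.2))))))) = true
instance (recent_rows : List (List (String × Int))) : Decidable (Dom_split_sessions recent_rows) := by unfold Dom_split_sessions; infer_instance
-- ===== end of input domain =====

-- B replaces A's forward accumulator loop (current/prev + trailing flush) by a single
-- right-to-left fold that merges each row into the following session or opens a new one.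

-- row["item_id"]: first-match lookup; Pre_ guarantees the key is present wherever A reads it,
-- so the default 0 is never the value used.
def pvItem (r : List (String × Int)) : Int := (List.lookup "item_id" r).getD 0

-- ===== PORT A =====
def pvLoopA : List (List (String × Int)) → List (List (List (String × Int))) → List (List (String × Int)) → Option (List (String × Int)) → List (List (List (String × Int)))
  | [], sessions, current, _ => if current.isEmpty then sessions else sessions ++ [current]
  | row :: rest, sessions, current, prev =>
      let cut : Bool := match prev with
        | some p => decide (pvItem row ≤ pvItem p)
        | none => false
      if cut then pvLoopA rest (sessions ++ [current]) ([] ++ [row]) (some row)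
      else pvLoopA rest sessions (current ++ [row]) (some row)

def split_sessions (recent_rows : List (List (String × Int))) : List (List (List (String × Int))) :=
  pvLoopA recent_rows [] [] none

-- ===== PORT B =====
def split_sessions_alt (recent_rows : List (List (String × Int))) : List (List (List (String × Int))) :=
  match recent_rows with
  | [] => []
  | row :: rest =>
    match split_sessions_alt rest with
    | [] => [[row]]
    | [] :: ss => [row] :: [] :: ss   -- unreachable: sessions are never empty
    | (q :: s) :: ss =>
      if pvItem q > pvItem row then (row :: q :: s) :: ss
      else [row] :: (q :: s) :: ss

-- ===== PRECONDITION & SPEC =====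
-- Pre_ excludes exactly the inputs where Python A raises KeyError: with two or more rows,
-- every row's "item_id" is read, so each must carry the key; with at most one row A never looks it up.
def Pre_split_sessions (recent_rows : List (List (String × Int))) : Prop :=
  recent_rows.length ≤ 1 ∨ ∀ r ∈ recent_rows, (List.lookup "item_id" r).isSome
instance (recent_rows : List (List (String × Int))) : Decidable (Pre_split_sessions recent_rows) := by unfold Pre_split_sessions; infer_instance

def pvWitness_split_sessions : (List (List (String × Int))) := [[("item_id", 3)], [("item_id", 1)], [("item_id", 2)]]

def Spec_split_sessions (recent_rows : List (List (String × Int))) (out : List (List (List (String × Int)))) : Prop := out = split_sessions_alt recent_rows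
instance (recent_rows : List (List (String × Int))) (out : List (List (List (String × Int)))) : Decidable (Spec_split_sessions recent_rows out) := by unfold Spec_split_sessions; infer_instance

-- ===== CLAIM (what is proved, stated in full; the proofs are below) =====
def Claim_equal_split_sessions : Prop := ∀ (recent_rows : List (List (String × Int))), Dom_split_sessions recent_rows → Pre_split_sessions recent_rows → Spec_split_sessions recent_rows (split_sessions recent_rows)

-- ===== LEMMAS AND PROOFS =====

-- every session produced by B is nonempty and starts with the first remaining row
theorem alt_cons_head (row : List (String × Int)) (rest : List (List (String × Int))) :
    ∃ s ss, split_sessions_alt (row :: rest) = (row :: s) :: ss := by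
  rw [split_sessions_alt]
  cases h : split_sessions_alt rest with
  | nil => exact ⟨[], [], rfl⟩
  | cons g ss =>
    cases g with
    | nil => exact ⟨[], [] :: ss, rfl⟩
    | cons q s =>
      by_cases hq : pvItem q > pvItem row
      · simp [hq]
      · simp [hq]

-- A's loop, once the first row has been consumed (current = c ++ [p], prev = some p),
-- finishes by prepending c ++ [p] onto B's grouping of the rest (merged or as a new session).
theorem loopA_eq (rest : List (List (String × Int))) :
    ∀ (sessions : List (List (List (String × Int)))) (c : List (List (String × Int))) (p : List (String × Int)),
    pvLoopA rest sessions (c ++ [p]) (some p) =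
      sessions ++ (match split_sessions_alt rest with
        | [] => [c ++ [p]]
        | [] :: ss => (c ++ [p]) :: [] :: ss
        | (q :: s) :: ss =>
          if pvItem q ≤ pvItem p then (c ++ [p]) :: (q :: s) :: ss
          else (c ++ [p] ++ (q :: s)) :: ss) := by
  induction rest with
  | nil => intro sessions c p; simp [pvLoopA, split_sessions_alt]
  | cons row rs ih =>
    intro sessions c p
    obtain ⟨s, ss, hs⟩ := alt_cons_head row rs
    rw [hs]
    by_cases hcut : pvItem row ≤ pvItem p
    · -- boundary: A flushes current and restarts with [row]
      rw [pvLoopA]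
      simp only [hcut, if_pos, decide_true]
      rw [ih (sessions ++ [c ++ [p]]) [] row]
      simp only [List.nil_append]
      have hb : split_sessions_alt (row :: rs) = (row :: s) :: ss := hs
      rw [split_sessions_alt] at hb
      cases h : split_sessions_alt rs with
      | nil =>
        rw [h] at hb
        simp only at hb
        obtain ⟨h1, h2⟩ := List.cons.injEq _ _ _ _ ▸ hb
        simp [← h1, ← h2]
      | cons g gs =>
        cases g with
        | nil =>
          rw [h] at hb; simp only at hb
          obtain ⟨h1, h2⟩ := List.cons.injEq _ _ _ _ ▸ hb
          simp [← h1, ← h2]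
        | cons q t =>
          rw [h] at hb
          by_cases hq : pvItem q > pvItem row
          · simp only [hq, if_pos] at hb
            obtain ⟨h1, h2⟩ := List.cons.injEq _ _ _ _ ▸ hb
            have hq' : ¬ pvItem q ≤ pvItem row := not_le.mpr hq
            simp only [hq', if_neg, not_false_iff]
            simp [← h1, ← h2]
          · simp only [hq, if_neg, not_false_iff] at hb
            obtain ⟨h1, h2⟩ := List.cons.injEq _ _ _ _ ▸ hb
            have hq' : pvItem q ≤ pvItem row := not_lt.mp hq
            simp only [hq', if_pos]
            simp [← h1, ← h2]
    · -- no boundary: row joins current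
      rw [pvLoopA]
      simp only [hcut, if_neg, decide_false, Bool.false_eq_true, not_false_iff]
      have := ih sessions (c ++ [p]) row
      rw [show (c ++ [p]) ++ [row] = c ++ [p] ++ [row] by simp] at this
      rw [this]
      have hb : split_sessions_alt (row :: rs) = (row :: s) :: ss := hs
      rw [split_sessions_alt] at hb
      cases h : split_sessions_alt rs with
      | nil =>
        rw [h] at hb; simp only at hb
        obtain ⟨h1, h2⟩ := List.cons.injEq _ _ _ _ ▸ hb
        simp [← h1, ← h2]
      | cons g gs =>
        cases g with
        | nil =>
          rw [h] at hb; simp only at hb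
          obtain ⟨h1, h2⟩ := List.cons.injEq _ _ _ _ ▸ hb
          simp [← h1, ← h2]
        | cons q t =>
          rw [h] at hb
          by_cases hq : pvItem q > pvItem row
          · simp only [hq, if_pos] at hb
            obtain ⟨h1, h2⟩ := List.cons.injEq _ _ _ _ ▸ hb
            have hq' : ¬ pvItem q ≤ pvItem row := not_le.mpr hq
            simp only [hq', if_neg, not_false_iff]
            simp [← h1, ← h2]
          · simp only [hq, if_neg, not_false_iff] at hb
            obtain ⟨h1, h2⟩ := List.cons.injEq _ _ _ _ ▸ hb
            have hq' : pvItem q ≤ pvItem row := not_lt.mp hq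
            simp only [hq', if_pos]
            simp [← h1, ← h2]

theorem ports_agree (recent_rows : List (List (String × Int))) :
    split_sessions recent_rows = split_sessions_alt recent_rows := by
  cases recent_rows with
  | nil => rfl
  | cons row rest =>
    show pvLoopA (row :: rest) [] [] none = _
    rw [show pvLoopA (row :: rest) [] [] none = pvLoopA rest [] ([] ++ [row]) (some row) from rfl]
    rw [loopA_eq rest [] [] row]
    rw [split_sessions_alt]
    cases h : split_sessions_alt rest with
    | nil => simp
    | cons g gs =>
      cases g with
      | nil => simp
      | cons q t =>
        by_cases hq : pvItem q > pvItem row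
        · have hq' : ¬ pvItem q ≤ pvItem row := not_le.mpr hq
          simp [hq, hq']
        · have hq' : pvItem q ≤ pvItem row := not_lt.mp hq
          simp [hq, hq']

-- ===== VERDICT (by name: the statement is the Claim_ definition above) =====
theorem split_sessions_spec : Claim_equal_split_sessions := by
  intro recent_rows _ _
  exact ports_agree recent_rows
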